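-- pv_equiv track=rewrite | github.com/pypi-data/pypi-mirror-400 | packages/pydtnn/pydtnn-2.0.0.tar.gz/pydtnn-2.0.0/pydtnn/converters/pytorch2pydtnn/common.py | get_equivalent_layer
-- ===== SOURCE A (Python) =====
-- from typing import Dict, Any, Callable, Tuple, List
--
-- def get_equivalent_layer(params: List[str], dict_equivalent_layers: Dict[str, str]) -> List[str]:
--     equivalent_layers = dict()
--     for param in params:
--         layer = param
--         while layer in dict_equivalent_layers:
--             layer = dict_equivalent_layers[layer]
--         equivalent_layers[layer] = None
--     return list(equivalent_layers.keys())
-- ===== SOURCE B (Python) =====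
-- def get_equivalent_layer(params, dict_equivalent_layers):
--     # Memoized resolution with path compression: the terminal is cached for
--     # every visited node, so each dict link is walked at most once overall.
--     cache = {}
--     result = {}
--     for param in params:
--         x = param
--         path = []
--         while x in dict_equivalent_layers and x not in cache:
--             path.append(x)
--             x = dict_equivalent_layers[x]
--         t = cache.get(x, x)
--         for p in path:
--             cache[p] = t
--         result[t] = None
--     return list(result.keys())
-- ===== Notes on version B (the rewrite author's own statement) =====
-- stated objective: alternative
-- what changed: B memoizes the terminal layer of every chain node it visits (path-compression cache consulted and updated during each walk), instead of A re-walking the full chain independently for every param; Pre_ excludes inputs whose equivalence chains contain a cycle reachable from params, on which A's while loop never terminates (A returns nothing there).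
import Mathlib
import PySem

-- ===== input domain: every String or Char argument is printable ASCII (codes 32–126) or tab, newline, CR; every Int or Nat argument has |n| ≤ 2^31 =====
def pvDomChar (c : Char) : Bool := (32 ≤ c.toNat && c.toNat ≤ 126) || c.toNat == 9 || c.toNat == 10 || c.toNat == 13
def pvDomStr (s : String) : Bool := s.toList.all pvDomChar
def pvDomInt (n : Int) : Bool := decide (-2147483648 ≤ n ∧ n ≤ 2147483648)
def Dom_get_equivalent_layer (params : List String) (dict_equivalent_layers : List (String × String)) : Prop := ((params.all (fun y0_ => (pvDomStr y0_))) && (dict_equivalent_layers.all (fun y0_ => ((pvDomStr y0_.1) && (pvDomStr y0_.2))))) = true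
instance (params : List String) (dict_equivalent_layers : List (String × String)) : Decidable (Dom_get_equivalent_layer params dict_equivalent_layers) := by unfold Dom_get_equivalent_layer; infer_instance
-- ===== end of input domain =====

-- B replaces A's per-param chain re-walk by a memoized (path-compressed) resolution that caches each node's terminal (alternative algorithm).
-- Pre_ excludes inputs whose chains cycle (A's while loop diverges; it returns nothing there).


-- first-match lookup in the association list (Python's dict lookup under the type convention)
def pvLk (d : List (String × String)) (x : String) : Option String :=
  (d.find? (fun p => p.1 == x)).map (·.2)

-- ===== PORT A =====
-- 'while layer in dict: layer = dict[layer]' as a fueled recursion; under Pre_ the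
-- chain escapes the key set within d.length steps, so fuel d.length + 1 is never exhausted.
def pyWhileA (d : List (String × String)) : Nat → String → String
  | 0, layer => layer
  | n+1, layer =>
    match pvLk d layer with
    | some v => pyWhileA d n v
    | none => layer

def get_equivalent_layer (params : List String) (dict_equivalent_layers : List (String × String)) : List String :=
  (params.foldl
    (fun (acc : PySem.Dict String (Option Unit)) param =>
      acc.insert (pyWhileA dict_equivalent_layers (dict_equivalent_layers.length + 1) param) none)
    PySem.Dict.empty).keys

-- ===== PORT B =====
-- the inner 'while x in dict and x not in cache: path.append(x); x = dict[x]'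
def pyWalkB (d : List (String × String)) (cache : PySem.Dict String String) :
    Nat → String → List String → String × List String
  | 0, x, path => (x, path)
  | n+1, x, path =>
    match pvLk d x, cache.get? x with
    | some v, none => pyWalkB d cache n v (path ++ [x])
    | _, _ => (x, path)

-- one iteration of B's 'for param in params' loop, threading (cache, result)
def pyStepB (d : List (String × String))
    (st : PySem.Dict String String × PySem.Dict String (Option Unit)) (param : String) :
    PySem.Dict String String × PySem.Dict String (Option Unit) :=
  let res := pyWalkB d st.1 (d.length + 1) param []
  let t := st.1.getD res.1 res.1
  (res.2.foldl (fun c p => c.insert p t) st.1, st.2.insert t none)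

def get_equivalent_layer_alt (params : List String) (dict_equivalent_layers : List (String × String)) : List String :=
  ((params.foldl (pyStepB dict_equivalent_layers) (PySem.Dict.empty, PySem.Dict.empty)).2).keys

-- ===== PRECONDITION & SPEC =====
-- chain-following used only to STATE the precondition (independent copy; not a port)
def pvChase (d : List (String × String)) : Nat → String → String
  | 0, x => x
  | n+1, x =>
    match pvLk d x with
    | some v => pvChase d n v
    | none => x

-- Pre_ excludes exactly the inputs on which A's while loop never terminates (the chain from
-- some param runs into a cycle of dict keys): A returns NOTHING there, it diverges.  A chain
-- that terminates never revisits a key, hence escapes the key set within d.length steps.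
def Pre_get_equivalent_layer (params : List String) (dict_equivalent_layers : List (String × String)) : Prop :=
  ∀ p ∈ params, pvLk dict_equivalent_layers (pvChase dict_equivalent_layers dict_equivalent_layers.length p) = none

instance (params : List String) (dict_equivalent_layers : List (String × String)) : Decidable (Pre_get_equivalent_layer params dict_equivalent_layers) := by unfold Pre_get_equivalent_layer; infer_instance

def pvWitness_get_equivalent_layer : List String × (List (String × String)) :=
  (["w", "a", "x", "a"], [("a", "b"), ("b", "c")])

def Spec_get_equivalent_layer (params : List String) (dict_equivalent_layers : List (String × String)) (out : List String) : Prop := out = get_equivalent_layer_alt params dict_equivalent_layers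
instance (params : List String) (dict_equivalent_layers : List (String × String)) (out : List String) : Decidable (Spec_get_equivalent_layer params dict_equivalent_layers out) := by unfold Spec_get_equivalent_layer; infer_instance

-- ===== CLAIM (what is proved, stated in full; the proofs are below) =====
def Claim_equal_get_equivalent_layer : Prop := ∀ (params : List String) (dict_equivalent_layers : List (String × String)), Dom_get_equivalent_layer params dict_equivalent_layers → Pre_get_equivalent_layer params dict_equivalent_layers → Spec_get_equivalent_layer params dict_equivalent_layers (get_equivalent_layer params dict_equivalent_layers)

-- ===== LEMMAS AND PROOFS =====

-- 'x escapes': the chain from x leaves the key set within d.length steps (termination of A's loop at x)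
def pvEsc (d : List (String × String)) (x : String) : Prop :=
  pvLk d (pvChase d d.length x) = none

-- cache invariant of B: every cached entry maps a dict key with terminating chain to its terminal
def pvInv (d : List (String × String)) (c : PySem.Dict String String) : Prop :=
  ∀ k v, c.get? k = some v → (pvLk d k).isSome ∧ pvEsc d k ∧ v = pvChase d d.length k

theorem chase_of_none {d : List (String × String)} {x : String} (h : pvLk d x = none) :
    ∀ n, pvChase d n x = x := by
  intro n; cases n <;> simp [pvChase, h]

theorem chase_stab {d : List (String × String)} :
    ∀ (n : Nat) (x : String), pvLk d (pvChase d n x) = none →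
      pvChase d (n + 1) x = pvChase d n x := by
  intro n
  induction n with
  | zero => intro x h; simp [pvChase] at h ⊢; simp [h]
  | succ n ih =>
    intro x h
    cases hlk : pvLk d x with
    | none => simp [pvChase, hlk]
    | some v =>
      have h' : pvLk d (pvChase d n v) = none := by simpa [pvChase, hlk] using h
      simpa [pvChase, hlk] using ih v h'

theorem esc_step {d : List (String × String)} {x v : String}
    (hlk : pvLk d x = some v) (hesc : pvEsc d x) :
    pvEsc d v ∧ pvChase d d.length v = pvChase d d.length x := by
  have hd : d ≠ [] := by
    intro h; subst h; simp [pvLk] at hlk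
  obtain ⟨m, hm⟩ : ∃ m, d.length = m + 1 := by
    cases hlen : d.length with
    | zero => exact absurd (List.length_eq_zero_iff.mp hlen) hd
    | succ m => exact ⟨m, rfl⟩
  have hx : pvChase d d.length x = pvChase d m v := by
    rw [hm]; simp [pvChase, hlk]
  have hnone : pvLk d (pvChase d m v) = none := by
    have := hesc; unfold pvEsc at this; rwa [hx] at this
  have hstab : pvChase d (m + 1) v = pvChase d m v := chase_stab m v hnone
  constructor
  · unfold pvEsc; rw [hm, hstab]; exact hnone
  · rw [hm, hstab, ← hx, hm]

theorem cache_miss {d : List (String × String)} {c : PySem.Dict String String} {x : String}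
    (hInv : pvInv d c) (hlk : pvLk d x = none) : c.get? x = none := by
  cases hc : c.get? x with
  | none => rfl
  | some t =>
    have := (hInv x t hc).1
    rw [hlk] at this; simp at this

theorem walk_spec {d : List (String × String)} {c : PySem.Dict String String}
    (hInv : pvInv d c) :
    ∀ (f : Nat) (x : String) (path : List String),
      pvLk d (pvChase d f x) = none → pvEsc d x →
      c.getD (pyWalkB d c f x path).1 (pyWalkB d c f x path).1 = pvChase d d.length x ∧
      ∃ ext, (pyWalkB d c f x path).2 = path ++ ext ∧
        ∀ p ∈ ext, (pvLk d p).isSome ∧ pvEsc d p ∧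
          pvChase d d.length p = pvChase d d.length x := by
  intro f
  induction f with
  | zero =>
    intro x path hf _
    simp only [pvChase] at hf
    have hc0 := cache_miss hInv hf
    refine ⟨?_, [], by simp [pyWalkB], by simp⟩
    simp [pyWalkB, PySem.Dict.getD_eq_get?_getD, hc0, chase_of_none hf]
  | succ f ih =>
    intro x path hf hesc
    cases hlk : pvLk d x with
    | none =>
      have hc0 := cache_miss hInv hlk
      refine ⟨?_, [], by simp [pyWalkB, hlk], by simp⟩
      simp [pyWalkB, hlk, PySem.Dict.getD_eq_get?_getD, hc0, chase_of_none hlk]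
    | some v =>
      cases hc : c.get? x with
      | some t =>
        refine ⟨?_, [], by simp [pyWalkB, hlk, hc], by simp⟩
        have ht := (hInv x t hc).2.2
        simp [pyWalkB, hlk, hc, PySem.Dict.getD_of_get?_eq_some _ _ hc, ht]
      | none =>
        have hf' : pvLk d (pvChase d f v) = none := by
          simpa [pvChase, hlk] using hf
        obtain ⟨hescv, hchv⟩ := esc_step hlk hesc
        obtain ⟨h1, ext, h2, h3⟩ := ih v (path ++ [x]) hf' hescv
        have hw : pyWalkB d c (f + 1) x path = pyWalkB d c f v (path ++ [x]) := by
          simp [pyWalkB, hlk, hc]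
        refine ⟨by rw [hw, h1, hchv], x :: ext, ?_, ?_⟩
        · rw [hw, h2]; simp
        · intro p hp
          rw [List.mem_cons] at hp
          rcases hp with hp | hp
          · subst hp; exact ⟨by simp [hlk], hesc, rfl⟩
          · obtain ⟨a, b, c'⟩ := h3 p hp
            exact ⟨a, b, c'.trans hchv⟩

theorem inv_insert_fold {d : List (String × String)} {T : String} :
    ∀ (ext : List String) (c : PySem.Dict String String), pvInv d c →
      (∀ p ∈ ext, (pvLk d p).isSome ∧ pvEsc d p ∧ pvChase d d.length p = T) →
      pvInv d (ext.foldl (fun c p => c.insert p T) c) := by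
  intro ext
  induction ext with
  | nil => intro c hInv _; simpa using hInv
  | cons q0 ext ih =>
    intro c hInv hprops
    simp only [List.foldl_cons]
    apply ih
    · intro k v hk
      rw [PySem.Dict.get?_insert] at hk
      by_cases hkp : k = q0
      · obtain ⟨a, b, c'⟩ := hprops q0 (List.mem_cons_self ..)
        rw [if_pos hkp] at hk
        subst hkp
        exact ⟨a, b, by rw [← Option.some_inj.mp hk, c']⟩
      · rw [if_neg hkp] at hk
        exact hInv k v hk
    · intro q hq; exact hprops q (List.mem_cons_of_mem _ hq)

theorem fold_eq {d : List (String × String)} :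
    ∀ (params : List String) (c : PySem.Dict String String)
      (accA accB : PySem.Dict String (Option Unit)),
      pvInv d c → accA = accB →
      (∀ p ∈ params, pvEsc d p) →
      params.foldl
        (fun acc param => acc.insert (pyWhileA d (d.length + 1) param) none) accA =
      (params.foldl (pyStepB d) (c, accB)).2 := by
  intro params
  induction params with
  | nil => intro c accA accB _ hAB _; simpa using hAB
  | cons p params ih =>
    intro c accA accB hInv hAB hpre
    have hesc : pvEsc d p := hpre p (by simp)
    -- A's chain with fuel d.length + 1 computes the terminal pvChase d d.length p
    have hA : pyWhileA d (d.length + 1) p = pvChase d d.length p := by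
      have hid : ∀ (n : Nat) (x : String), pyWhileA d n x = pvChase d n x := by
        intro n
        induction n with
        | zero => intro x; rfl
        | succ n ihn =>
          intro x
          cases hlk : pvLk d x <;> simp [pyWhileA, pvChase, hlk, ihn]
      rw [hid, chase_stab d.length p hesc]
    have hfuel : pvLk d (pvChase d (d.length + 1) p) = none := by
      rw [chase_stab d.length p hesc]; exact hesc
    obtain ⟨h1, ext, h2, h3⟩ := walk_spec hInv (d.length + 1) p [] hfuel hesc
    simp only [List.foldl_cons]
    apply ih
    · -- cache invariant preserved
      apply inv_insert_fold ((pyWalkB d c (d.length + 1) p []).2) c hInv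
      rw [h1]
      intro q hq
      rw [h2] at hq
      simpa using h3 q (by simpa using hq)
    · -- both result dicts get the same key inserted
      rw [hAB]
      rw [hA, h1]
    · intro q hq; exact hpre q (by simp [hq])

-- ===== VERDICT (by name: the statement is the Claim_ definition above) =====
theorem get_equivalent_layer_spec : Claim_equal_get_equivalent_layer := by
  intro params d _ hpre
  unfold Spec_get_equivalent_layer get_equivalent_layer get_equivalent_layer_alt
  congr 1
  exact fold_eq params PySem.Dict.empty PySem.Dict.empty PySem.Dict.empty
    (by intro k v h; simp [PySem.Dict.get?_empty] at h) rfl hpre
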